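-- pv_equiv track=rewrite | github.com/0707pinar/Evalita-Hate-Speech-Detection-in-Italian | evalita_hate_speech_detection_preprocessing.py | add_whitespace_before_and_after_punctuation
-- ===== SOURCE A (Python) =====
-- def add_whitespace_before_and_after_punctuation(text_in_list):
--     # This puts a whitespace before and after punctuation """
--     selected_punctuations = '!\"#$%&()*+,_-./:;<=>?[\]^`{|}~'
--     text_with_space_before_after_punctuation = []
--
--     for line in text_in_list:
--         text_with_space_before_after_punctuation.append(["".join(line).translate(str.maketrans({key: " {0} ".format(key) for key in selected_punctuations}))])
--
--     tokenized_text_with_space_before_after_punctuation = []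
--     for line in text_with_space_before_after_punctuation:
--         tokenized_text_with_space_before_after_punctuation.append("".join(line).strip().split())
--
--     return tokenized_text_with_space_before_after_punctuation
-- ===== SOURCE B (Python) =====
-- # One-pass tokenizer: instead of building a padded translation of each line and
-- # re-splitting it, scan the joined line once, emitting punctuation chars as
-- # single tokens and maximal runs of other non-space chars as word tokens.
-- _PUNCT = set('!"#$%&()*+,_-./:;<=>?[\\]^`{|}~')
--
-- def _tokenize(s):
--     tokens = []
--     word = []
--     for ch in s:
--         if ch in _PUNCT:
--             if word:
--                 tokens.append("".join(word))
--                 word = []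
--             tokens.append(ch)
--         elif ch.isspace():
--             if word:
--                 tokens.append("".join(word))
--                 word = []
--         else:
--             word.append(ch)
--     if word:
--         tokens.append("".join(word))
--     return tokens
--
-- def add_whitespace_before_and_after_punctuation(text_in_list):
--     return [_tokenize("".join(line)) for line in text_in_list]
-- ===== Notes on version B (the rewrite author's own statement) =====
-- stated objective: simpler
-- what changed: B replaces A's two-pass pipeline (build a space-padded translation of each joined line via a str.maketrans table, then strip and re-split it) by a single left-to-right scan of each joined line that emits punctuation characters as single tokens and maximal runs of other non-space characters as word tokens, with no intermediate string.
import Mathlib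
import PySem

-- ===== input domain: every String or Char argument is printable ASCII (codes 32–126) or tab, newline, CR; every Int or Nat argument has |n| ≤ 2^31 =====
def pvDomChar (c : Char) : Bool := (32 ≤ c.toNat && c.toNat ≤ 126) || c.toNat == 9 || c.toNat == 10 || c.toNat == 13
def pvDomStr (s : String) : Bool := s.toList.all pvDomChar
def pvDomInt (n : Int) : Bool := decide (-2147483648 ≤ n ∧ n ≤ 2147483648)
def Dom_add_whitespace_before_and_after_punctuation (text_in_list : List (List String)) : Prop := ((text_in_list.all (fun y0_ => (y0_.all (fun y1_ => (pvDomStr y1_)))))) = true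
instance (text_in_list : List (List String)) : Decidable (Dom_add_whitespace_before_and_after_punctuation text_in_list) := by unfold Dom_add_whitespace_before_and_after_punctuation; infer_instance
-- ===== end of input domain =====

-- B replaces A's translate-pad-then-strip-split pipeline by a single left-to-right scan of each
-- joined line that emits tokens directly (objective: simpler, one pass, no intermediate string).

-- ===== PORT A =====
-- str.translate with the table {c: " c " for c in selected_punctuations} is ported by hand
-- (PySem has no translate): each table char becomes ' c ', every other char is unchanged — exact.
def pvTranslateA (selected : List Char) (s : String) : String :=
  String.ofList (s.toList.flatMap (fun c => if selected.contains c then [' ', c, ' '] else [c]))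

def add_whitespace_before_and_after_punctuation (text_in_list : List (List String)) : List (List String) :=
  let selected_punctuations : List Char := "!\"#$%&()*+,_-./:;<=>?[\\]^`{|}~".toList
  let padded : List (List String) :=
    text_in_list.foldl (fun acc line => acc ++ [[pvTranslateA selected_punctuations (PySem.Str.join "" line)]]) []
  padded.foldl (fun acc line => acc ++ [PySem.Str.split₀ (PySem.Str.strip (PySem.Str.join "" line))]) []

-- ===== PORT B =====
def pvPunct : List Char := "!\"#$%&()*+,_-./:;<=>?[\\]^`{|}~".toList

def pvTokStep (st : List String × List Char) (ch : Char) : List String × List Char :=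
  if pvPunct.contains ch then
    ((if st.2.isEmpty then st.1 else st.1 ++ [String.ofList st.2]) ++ [String.ofList [ch]], [])
  else if PySem.Chars.isspace ch then
    ((if st.2.isEmpty then st.1 else st.1 ++ [String.ofList st.2]), [])
  else
    (st.1, st.2 ++ [ch])

def pvTokenize (s : String) : List String :=
  let st := s.toList.foldl pvTokStep ([], [])
  if st.2.isEmpty then st.1 else st.1 ++ [String.ofList st.2]

def add_whitespace_before_and_after_punctuation_alt (text_in_list : List (List String)) : List (List String) :=
  text_in_list.map (fun line => pvTokenize (PySem.Str.join "" line))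

-- ===== PRECONDITION & SPEC =====
def Spec_add_whitespace_before_and_after_punctuation (text_in_list : List (List String)) (out : List (List String)) : Prop := out = add_whitespace_before_and_after_punctuation_alt text_in_list
instance (text_in_list : List (List String)) (out : List (List String)) : Decidable (Spec_add_whitespace_before_and_after_punctuation text_in_list out) := by unfold Spec_add_whitespace_before_and_after_punctuation; infer_instance

-- ===== CLAIM (what is proved, stated in full; the proofs are below) =====
def Claim_equal_add_whitespace_before_and_after_punctuation : Prop := ∀ (text_in_list : List (List String)), Dom_add_whitespace_before_and_after_punctuation text_in_list → Spec_add_whitespace_before_and_after_punctuation text_in_list (add_whitespace_before_and_after_punctuation text_in_list)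

-- ===== LEMMAS AND PROOFS =====

-- Reference tokenizer both ports are reduced to: cur is the pending word (in order).
def pvTokSpec : List Char → List Char → List (List Char)
  | [], cur => if cur.isEmpty then [] else [cur]
  | c :: rest, cur =>
    if pvPunct.contains c then
      (if cur.isEmpty then [] else [cur]) ++ [c] :: pvTokSpec rest []
    else if PySem.Chars.isspace c then
      (if cur.isEmpty then [] else [cur]) ++ pvTokSpec rest []
    else
      pvTokSpec rest (cur ++ [c])

theorem pvPunct_not_ws {c : Char} (h : c ∈ pvPunct) : PySem.Chars.isspace c = false := by
  have hall : pvPunct.all (fun c => !PySem.Chars.isspace c) = true := by decide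
  simpa using List.all_eq_true.mp hall c h

-- finalize B's fold state (proof-side name for the tail of pvTokenize)
def pvFin (st : List String × List Char) : List String :=
  if st.2.isEmpty then st.1 else st.1 ++ [String.ofList st.2]

-- B's fold equals the reference tokenizer.
theorem pvTokB (cs : List Char) : ∀ (tokens : List String) (word : List Char),
    pvFin (cs.foldl pvTokStep (tokens, word)) = tokens ++ (pvTokSpec cs word).map String.ofList := by
  induction cs with
  | nil => intro tokens word; cases word <;> simp [pvFin, pvTokSpec]
  | cons c rest ih =>
    intro tokens word
    rw [List.foldl_cons]
    by_cases hp : c ∈ pvPunct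
    · have hstep : pvTokStep (tokens, word) c
          = ((if word.isEmpty then tokens else tokens ++ [String.ofList word]) ++ [String.ofList [c]], []) := by
        simp [pvTokStep, hp]
      rw [hstep, ih]
      cases word <;> simp [pvTokSpec, hp]
    · by_cases hw : PySem.Chars.isspace c = true
      · have hstep : pvTokStep (tokens, word) c
            = ((if word.isEmpty then tokens else tokens ++ [String.ofList word]), []) := by
          simp [pvTokStep, hp, hw]
        rw [hstep, ih]
        cases word <;> simp [pvTokSpec, hp, hw]
      · have hstep : pvTokStep (tokens, word) c = (tokens, word ++ [c]) := by
          simp [pvTokStep, hp, hw]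
        rw [hstep, ih]
        simp [pvTokSpec, hp, hw]

def pvPad (c : Char) : List Char := if pvPunct.contains c then [' ', c, ' '] else [c]

-- A's split₀.go on the translated string equals the reference tokenizer.
theorem pvTokA (cs : List Char) : ∀ (cur : List Char) (acc : List (List Char)),
    PySem.Chars.split₀.go (cs.flatMap pvPad) cur acc = acc.reverse ++ pvTokSpec cs cur.reverse := by
  induction cs with
  | nil => intro cur acc; cases cur <;> simp [PySem.Chars.split₀.go, pvTokSpec]
  | cons c rest ih =>
    intro cur acc
    simp only [List.flatMap_cons, pvPad]
    by_cases hp : c ∈ pvPunct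
    · have hw := pvPunct_not_ws hp
      cases cur <;>
        simp [hp, hw, PySem.Chars.split₀.go, pvTokSpec, ih,
          (by decide : PySem.Chars.isspace ' ' = true)]
    · by_cases hws : PySem.Chars.isspace c = true
      · cases cur <;> simp [hp, hws, PySem.Chars.split₀.go, pvTokSpec, ih]
      · cases cur <;> simp [hp, hws, PySem.Chars.split₀.go, pvTokSpec, ih]

-- split₀ ignores surrounding whitespace, so A's .strip() is transparent to it.
theorem pv_go_allws (sfx : List Char) (h : ∀ c ∈ sfx, PySem.Chars.isspace c = true) :
    ∀ acc, PySem.Chars.split₀.go sfx [] acc = acc.reverse := by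
  induction sfx with
  | nil => intro acc; simp [PySem.Chars.split₀.go]
  | cons c rest ih =>
    intro acc
    have hc : PySem.Chars.isspace c = true := h c (by simp)
    simp [PySem.Chars.split₀.go, hc, ih (fun d hd => h d (by simp [hd]))]

theorem pv_go_append_ws (x sfx : List Char) (h : ∀ c ∈ sfx, PySem.Chars.isspace c = true) :
    ∀ cur acc, PySem.Chars.split₀.go (x ++ sfx) cur acc = PySem.Chars.split₀.go x cur acc := by
  induction x with
  | nil =>
    intro cur acc
    cases sfx with
    | nil => simp
    | cons c rest =>
      have hc : PySem.Chars.isspace c = true := h c (by simp)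
      cases cur <;>
        simp [PySem.Chars.split₀.go, hc, pv_go_allws rest (fun d hd => h d (by simp [hd]))]
  | cons a x ih =>
    intro cur acc
    by_cases ha : PySem.Chars.isspace a = true <;>
      cases hcur : cur.isEmpty <;> simp [PySem.Chars.split₀.go, ha, hcur, ih]

theorem pv_split_lstrip (x : List Char) :
    ∀ acc, PySem.Chars.split₀.go (PySem.Chars.lstrip x) [] acc = PySem.Chars.split₀.go x [] acc := by
  induction x with
  | nil => intro acc; simp [PySem.Chars.lstrip]
  | cons c rest ih =>
    intro acc
    by_cases hc : PySem.Chars.isspace c = true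
    · simpa [PySem.Chars.lstrip, List.dropWhile_cons, hc, PySem.Chars.split₀.go]
        using ih acc
    · simp [PySem.Chars.lstrip, hc]

theorem pv_split_strip (x : List Char) :
    PySem.Chars.split₀ (PySem.Chars.strip x) = PySem.Chars.split₀ x := by
  unfold PySem.Chars.split₀ PySem.Chars.strip
  set y := PySem.Chars.lstrip x with hy
  have hdecomp : y = PySem.Chars.rstrip y ++ (y.reverse.takeWhile PySem.Chars.isspace).reverse := by
    unfold PySem.Chars.rstrip
    conv_lhs => rw [← List.reverse_reverse y,
      ← List.takeWhile_append_dropWhile (p := PySem.Chars.isspace) (l := y.reverse)]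
    rw [List.reverse_append]
  have hws : ∀ c ∈ (y.reverse.takeWhile PySem.Chars.isspace).reverse, PySem.Chars.isspace c = true := by
    intro c hc
    exact List.mem_takeWhile_imp (by simpa using hc)
  calc PySem.Chars.split₀.go (PySem.Chars.rstrip y) [] []
      = PySem.Chars.split₀.go (PySem.Chars.rstrip y ++ (y.reverse.takeWhile PySem.Chars.isspace).reverse) [] [] :=
        (pv_go_append_ws _ _ hws [] []).symm
    _ = PySem.Chars.split₀.go y [] [] := by rw [← hdecomp]
    _ = PySem.Chars.split₀.go x [] [] := pv_split_lstrip x []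

-- per-line: A's pipeline equals B's scan.
theorem pv_line (s : String) :
    PySem.Str.split₀ (PySem.Str.strip (pvTranslateA pvPunct s)) = pvTokenize s := by
  have hA : PySem.Str.split₀ (PySem.Str.strip (pvTranslateA pvPunct s))
      = (pvTokSpec s.toList []).map String.ofList := by
    simp only [PySem.Str.split₀, PySem.Str.strip, pvTranslateA, String.toList_ofList]
    rw [show (s.toList.flatMap fun c => if pvPunct.contains c then [' ', c, ' '] else [c])
          = s.toList.flatMap pvPad from rfl]
    rw [pv_split_strip]
    unfold PySem.Chars.split₀
    rw [pvTokA s.toList [] []]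
    simp
  rw [hA]
  have hfin : pvTokenize s = pvFin (s.toList.foldl pvTokStep ([], [])) := rfl
  rw [hfin, pvTokB s.toList [] []]
  simp

theorem pv_foldl_append {α β : Type} (f : α → β) (l : List α) :
    ∀ acc : List β, l.foldl (fun acc x => acc ++ [f x]) acc = acc ++ l.map f := by
  induction l with
  | nil => simp
  | cons a l ih => intro acc; simp [ih]

theorem pv_join_single (t : String) : PySem.Str.join "" [t] = t := by
  simp [PySem.Str.join, PySem.Chars.join, List.intercalate]

-- ===== VERDICT (by name: the statement is the Claim_ definition above) =====
theorem add_whitespace_before_and_after_punctuation_spec : Claim_equal_add_whitespace_before_and_after_punctuation := by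
  intro text_in_list _
  show add_whitespace_before_and_after_punctuation text_in_list
      = add_whitespace_before_and_after_punctuation_alt text_in_list
  unfold add_whitespace_before_and_after_punctuation add_whitespace_before_and_after_punctuation_alt
  show List.foldl (fun acc line => acc ++ [PySem.Str.split₀ (PySem.Str.strip (PySem.Str.join "" line))]) []
      (List.foldl (fun acc line =>
        acc ++ [[pvTranslateA ("!\"#$%&()*+,_-./:;<=>?[\\]^`{|}~".toList) (PySem.Str.join "" line)]]) [] text_in_list)
      = _
  rw [pv_foldl_append (fun line =>
        [pvTranslateA ("!\"#$%&()*+,_-./:;<=>?[\\]^`{|}~".toList) (PySem.Str.join "" line)]) text_in_list [],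
      List.nil_append,
      pv_foldl_append (fun line => PySem.Str.split₀ (PySem.Str.strip (PySem.Str.join "" line))) _ [],
      List.nil_append, List.map_map]
  simp only [Function.comp_def]
  refine List.map_congr_left (fun line _ => ?_)
  rw [pv_join_single, (rfl : ("!\"#$%&()*+,_-./:;<=>?[\\]^`{|}~".toList) = pvPunct)]
  exact pv_line _
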